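-- pv_equiv track=rewrite | github.com/vkvang44/TheDailyAlgo | questions/utils.py | get_std_output
-- ===== SOURCE A (Python) =====
-- def get_std_output(outputs_arr):
--     # get stdout
--     s = False
--     temp = []
--     std_output = []
--     for word in outputs_arr:
--         if word == "STDOUT:":
--             s = True
--             continue
--         elif word == "RESULT:":
--             s = False
--             std_output.append(temp)
--             temp = []
--         if s == True:
--             temp.append(word)
--     return std_output
-- ===== SOURCE B (Python) =====
-- def get_std_output(outputs_arr):
--     # split-then-process: cut into "RESULT:"-terminated segments (trailing
--     # words after the last "RESULT:" are dropped), then extract each group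
--     segments = []
--     current = []
--     for word in outputs_arr:
--         if word == "RESULT:":
--             segments.append(current)
--             current = []
--         else:
--             current.append(word)
--     groups = []
--     for seg in segments:
--         if "STDOUT:" in seg:
--             rest = seg[seg.index("STDOUT:") + 1:]
--             groups.append([w for w in rest if w != "STDOUT:"])
--         else:
--             groups.append([])
--     return groups
-- ===== Notes on version B (the rewrite author's own statement) =====
-- stated objective: alternative
-- what changed: Replaces the fused boolean state-machine pass with a two-phase decomposition: first split the words into RESULT:-terminated segments (dropping the unterminated tail), then map each segment to the words after its first STDOUT: with STDOUT: tokens filtered out.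
import Mathlib
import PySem

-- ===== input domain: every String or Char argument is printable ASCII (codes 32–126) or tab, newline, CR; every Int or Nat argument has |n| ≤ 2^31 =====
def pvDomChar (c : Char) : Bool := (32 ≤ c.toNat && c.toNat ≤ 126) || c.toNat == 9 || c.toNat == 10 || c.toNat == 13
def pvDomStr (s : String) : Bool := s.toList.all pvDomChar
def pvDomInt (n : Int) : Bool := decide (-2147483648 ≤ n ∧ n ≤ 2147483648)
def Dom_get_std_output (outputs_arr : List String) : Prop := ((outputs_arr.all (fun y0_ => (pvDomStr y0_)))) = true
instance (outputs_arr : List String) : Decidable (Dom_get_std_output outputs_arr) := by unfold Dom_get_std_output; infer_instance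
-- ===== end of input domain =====

-- B replaces A's fused boolean state-machine pass by a split-into-RESULT:-terminated-segments
-- pass followed by per-segment extraction (index + slice + filter): objective 'alternative'.

-- ===== PORT A =====
-- A's loop state: (s, temp, std_output)
def pvStepA (st : Bool × List String × List (List String)) (word : String) :
    Bool × List String × List (List String) :=
  if word = "STDOUT:" then (true, st.2.1, st.2.2)        -- s = True; continue
  else if word = "RESULT:" then (false, [], st.2.2 ++ [st.2.1])  -- s = False; append temp; reset
  else if st.1 then (st.1, st.2.1 ++ [word], st.2.2)     -- if s: temp.append(word)
  else st

def get_std_output (outputs_arr : List String) : List (List String) :=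
  (outputs_arr.foldl pvStepA (false, [], [])).2.2

-- ===== PORT B =====
-- splitting loop state: (segments, current)
def pvSplitStep (st : List (List String) × List String) (word : String) :
    List (List String) × List String :=
  if word = "RESULT:" then (st.1 ++ [st.2], []) else (st.1, st.2 ++ [word])

-- per-segment extraction: words after the first "STDOUT:", with "STDOUT:" filtered out
def pvGroup (seg : List String) : List String :=
  if seg.contains "STDOUT:" then
    match PySem.List.index? seg "STDOUT:" with
    | some i => (PySem.List.slice seg (some ((i : Int) + 1)) none).filter (fun w => w ≠ "STDOUT:")
    | none => []   -- unreachable: "STDOUT:" ∈ seg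
  else []

def get_std_output_alt (outputs_arr : List String) : List (List String) :=
  ((outputs_arr.foldl pvSplitStep ([], [])).1).map pvGroup

-- ===== PRECONDITION & SPEC =====
def Spec_get_std_output (outputs_arr : List String) (out : List (List String)) : Prop := out = get_std_output_alt outputs_arr
instance (outputs_arr : List String) (out : List (List String)) : Decidable (Spec_get_std_output outputs_arr out) := by unfold Spec_get_std_output; infer_instance

-- ===== CLAIM (what is proved, stated in full; the proofs are below) =====
def Claim_equal_get_std_output : Prop := ∀ (outputs_arr : List String), Dom_get_std_output outputs_arr → Spec_get_std_output outputs_arr (get_std_output outputs_arr)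

-- ===== LEMMAS AND PROOFS =====

-- the segments B's splitting loop produces, as a structural recursion
def pvSegs (seg : List String) : List String → List (List String)
  | [] => []
  | w :: ws => if w = "RESULT:" then seg :: pvSegs [] ws else pvSegs (seg ++ [w]) ws

theorem pvSplit_eq_segs (xs : List String) :
    ∀ (segs : List (List String)) (seg : List String),
      (xs.foldl pvSplitStep (segs, seg)).1 = segs ++ pvSegs seg xs := by
  induction xs with
  | nil => intro segs seg; simp [pvSegs]
  | cons w ws ih =>
    intro segs seg
    by_cases h : w = "RESULT:" <;>
      simp [pvSplitStep, pvSegs, h, ih]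

-- recursive characterisation of pvGroup
def pvG : List String → List String
  | [] => []
  | w :: ws => if w = "STDOUT:" then ws.filter (fun x => x ≠ "STDOUT:") else pvG ws

theorem pvGroup_eq_pvG (seg : List String) : pvGroup seg = pvG seg := by
  induction seg with
  | nil => simp [pvGroup, pvG]
  | cons w ws ih =>
    by_cases h : w = "STDOUT:"
    · subst h
      simp only [pvGroup, pvG, List.contains_cons]
      rw [PySem.List.index?_cons_self]
      simp [PySem.List.slice_from_one]
    · simp only [pvG, if_neg h]
      rw [← ih]
      simp only [pvGroup]
      rw [PySem.List.index?_cons_of_ne _ h]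
      by_cases hm : ("STDOUT:" : String) ∈ ws
      · have hc : (w :: ws).contains "STDOUT:" = true := by simp [hm]
        have hc' : ws.contains "STDOUT:" = true := by simpa using hm
        rw [if_pos hc, if_pos hc']
        obtain ⟨i, hi⟩ := Option.isSome_iff_exists.1 ((PySem.List.index?_isSome_iff ws "STDOUT:").2 hm)
        rw [hi]
        simp only [Option.map_some]
        rw [show (((i + 1 : Nat) : Int) + 1) = (((i + 2 : Nat)) : Int) by push_cast; ring,
            show ((i : Int) + 1) = (((i + 1 : Nat)) : Int) by push_cast; ring,
            PySem.List.slice_from_natCast, PySem.List.slice_from_natCast]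
        simp [List.drop_succ_cons]
      · have hne : ¬("STDOUT:" = w) := fun e => h e.symm
        rw [if_neg (by simp [hm, hne]), if_neg (by simp [hm])]

theorem pvG_nil_of_not_mem {seg : List String} (h : ("STDOUT:" : String) ∉ seg) :
    pvG seg = [] := by
  induction seg with
  | nil => rfl
  | cons w ws ih =>
    simp only [List.mem_cons, not_or] at h
    simp [pvG, Ne.symm h.1, ih h.2]

theorem pvG_append_stdout (seg : List String) :
    pvG (seg ++ ["STDOUT:"]) = pvG seg := by
  induction seg with
  | nil => simp [pvG]
  | cons w ws ih =>
    by_cases h : w = "STDOUT:"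
    · subst h; simp [pvG, List.filter_append]
    · simp [pvG, h, ih]

theorem pvG_append_other {w : String} (hw : w ≠ "STDOUT:") (seg : List String) :
    pvG (seg ++ [w]) = if ("STDOUT:" : String) ∈ seg then pvG seg ++ [w] else [] := by
  induction seg with
  | nil => simp [pvG]
  | cons x xs ih =>
    by_cases h : x = "STDOUT:"
    · subst h; simp [pvG, List.filter_append, hw]
    · simp [pvG, h, ih, Ne.symm h]

theorem pvA_loop (xs : List String) :
    ∀ (seg : List String) (out : List (List String)),
      (xs.foldl pvStepA (seg.contains "STDOUT:", pvG seg, out)).2.2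
        = out ++ (pvSegs seg xs).map pvG := by
  induction xs with
  | nil => intro seg out; simp [pvSegs]
  | cons w ws ih =>
    intro seg out
    by_cases h1 : w = "STDOUT:"
    · subst h1
      have hst : pvStepA (seg.contains "STDOUT:", pvG seg, out) "STDOUT:"
          = ((seg ++ ["STDOUT:"]).contains "STDOUT:", pvG (seg ++ ["STDOUT:"]), out) := by
        simp [pvStepA, pvG_append_stdout]
      rw [List.foldl_cons, hst, ih]
      simp [pvSegs]
    · by_cases h2 : w = "RESULT:"
      · subst h2
        have hst : pvStepA (seg.contains "STDOUT:", pvG seg, out) "RESULT:"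
            = (([] : List String).contains "STDOUT:", pvG [], out ++ [pvG seg]) := by
          simp [pvStepA, pvG]
        rw [List.foldl_cons, hst, ih]
        simp [pvSegs]
      · have hne : ¬("STDOUT:" = w) := fun e => h1 e.symm
        have hst : pvStepA (seg.contains "STDOUT:", pvG seg, out) w
            = ((seg ++ [w]).contains "STDOUT:", pvG (seg ++ [w]), out) := by
          by_cases hm : ("STDOUT:" : String) ∈ seg
          · have hc : seg.contains "STDOUT:" = true := by simpa using hm
            simp [pvStepA, h1, h2, pvG_append_other h1, hm, hne]
          · have hc : seg.contains "STDOUT:" = false := by simpa using hm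
            simp [pvStepA, h1, h2, pvG_append_other h1, hm, hne,
                  pvG_nil_of_not_mem hm]
        rw [List.foldl_cons, hst, ih]
        simp [pvSegs, h2]

-- ===== VERDICT (by name: the statement is the Claim_ definition above) =====
theorem get_std_output_spec : Claim_equal_get_std_output := by
  intro xs _
  unfold Spec_get_std_output get_std_output get_std_output_alt
  rw [pvSplit_eq_segs xs [] []]
  have := pvA_loop xs [] []
  simp only [List.contains_nil] at this
  rw [show pvG [] = [] from rfl] at this
  rw [this]
  simp [List.map_congr_left (fun s _ => (pvGroup_eq_pvG s).symm)]
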